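-- pv_equiv track=rewrite | github.com/Chanakyasinde/Practice_Problems | Python/Python_Maths/type_of_matrix.py | matrix_type
-- ===== SOURCE A (Python) =====
-- def matrix_type(n, matrix):
--     is_diagonal = True
--     is_symmetric = True
--     is_skew_symmetric = True
--     for i in range(n):
--         for j in range(n):
--             if i !=j and matrix[i][j] !=0:
--                 is_diagonal =False
--             if matrix[i][j] !=matrix[j][i]:
--                 is_symmetric =False
--             if matrix[i][j] !=-matrix[j][i]:
--                 is_skew_symmetric =False
--             if i ==j and matrix[i][j] !=0:
--                 is_skew_symmetric =False
--     if is_diagonal: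
--         return "Diagonal"
--     elif is_symmetric:
--         return "Symmetric"
--     elif is_skew_symmetric:
--         return "Skew-Symmetric"
--     else:
--         return "None"
-- ===== SOURCE B (Python) =====
-- def matrix_type(n, matrix):
--     idx = range(n)
--     if all(matrix[i][j] == 0 for i in idx for j in idx if i != j):
--         return "Diagonal"
--     M = [[matrix[i][j] for j in idx] for i in idx]
--     T = [[matrix[j][i] for j in idx] for i in idx]
--     if M == T:
--         return "Symmetric"
--     if M == [[-x for x in row] for row in T]:
--         return "Skew-Symmetric"
--     return "None"
-- ===== Notes on version B (the rewrite author's own statement) =====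
-- stated objective: simpler
-- what changed: Replaced the fused double loop maintaining three boolean flags with three independent per-property checks in priority order: an all() scan of the off-diagonal entries, then an explicitly built n-by-n transpose compared for equality to the matrix, and to its entry-wise negation (which forces a zero diagonal automatically).
import Mathlib
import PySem

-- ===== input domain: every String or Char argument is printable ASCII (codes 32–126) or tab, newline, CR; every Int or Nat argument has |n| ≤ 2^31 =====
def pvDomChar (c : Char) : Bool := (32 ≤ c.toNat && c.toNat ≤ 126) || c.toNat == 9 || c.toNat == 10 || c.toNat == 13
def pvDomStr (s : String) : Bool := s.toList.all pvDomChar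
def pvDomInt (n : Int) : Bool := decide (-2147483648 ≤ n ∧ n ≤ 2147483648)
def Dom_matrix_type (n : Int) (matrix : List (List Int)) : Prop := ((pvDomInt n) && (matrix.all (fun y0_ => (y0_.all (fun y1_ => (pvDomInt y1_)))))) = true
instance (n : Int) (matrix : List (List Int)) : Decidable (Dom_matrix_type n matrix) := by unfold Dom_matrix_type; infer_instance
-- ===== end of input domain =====

-- B replaces A's fused double loop maintaining three flags by three independent
-- per-property checks (off-diagonal scan, then comparison with an explicitly built
-- transpose and with its negation); objective: simpler, same cost.

-- matrix[i][j] as both Pythons evaluate it; always in range when Pre_matrix_type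
-- holds, so the .getD defaults are never reached on admitted inputs.
def pvGet (matrix : List (List Int)) (i j : Int) : Int :=
  (PySem.List.pyGet? ((PySem.List.pyGet? matrix i).getD []) j).getD 0

-- ===== PORT A =====
def matrix_type (n : Int) (matrix : List (List Int)) : String :=
  let st :=
    (PySem.List.pyRange 0 n 1).foldl (fun (st : Bool × Bool × Bool) i =>
      (PySem.List.pyRange 0 n 1).foldl (fun (st : Bool × Bool × Bool) j =>
        let is_diagonal := if i ≠ j ∧ pvGet matrix i j ≠ 0 then false else st.1
        let is_symmetric := if pvGet matrix i j ≠ pvGet matrix j i then false else st.2.1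
        let is_skew := if pvGet matrix i j ≠ -(pvGet matrix j i) then false else st.2.2
        let is_skew := if i = j ∧ pvGet matrix i j ≠ 0 then false else is_skew
        (is_diagonal, is_symmetric, is_skew)) st) (true, true, true)
  if st.1 then "Diagonal"
  else if st.2.1 then "Symmetric"
  else if st.2.2 then "Skew-Symmetric"
  else "None"

-- ===== PORT B =====
def matrix_type_alt (n : Int) (matrix : List (List Int)) : String :=
  let idx := PySem.List.pyRange 0 n 1
  if idx.all (fun i => idx.all (fun j => i == j || pvGet matrix i j == 0)) then "Diagonal"
  else
    let M := idx.map (fun i => idx.map (fun j => pvGet matrix i j))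
    let T := idx.map (fun i => idx.map (fun j => pvGet matrix j i))
    if M = T then "Symmetric"
    else if M = T.map (fun row => row.map (fun x => -x)) then "Skew-Symmetric"
    else "None"

-- ===== PRECONDITION & SPEC =====
-- Pre_ excludes exactly the inputs on which Python A raises IndexError: A reads
-- matrix[i][j] for all 0 ≤ i, j < n, so the first n rows must exist and have ≥ n entries.
def Pre_matrix_type (n : Int) (matrix : List (List Int)) : Prop :=
  n ≤ (matrix.length : Int) ∧ ∀ row ∈ matrix.take n.toNat, n ≤ (row.length : Int)
instance (n : Int) (matrix : List (List Int)) : Decidable (Pre_matrix_type n matrix) := by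
  unfold Pre_matrix_type; infer_instance
def pvWitness_matrix_type : Int × List (List Int) := (2, [[1, 2], [3, 4]])

def Spec_matrix_type (n : Int) (matrix : List (List Int)) (out : String) : Prop := out = matrix_type_alt n matrix
instance (n : Int) (matrix : List (List Int)) (out : String) : Decidable (Spec_matrix_type n matrix out) := by unfold Spec_matrix_type; infer_instance

-- ===== CLAIM (what is proved, stated in full; the proofs are below) =====
def Claim_equal_matrix_type : Prop := ∀ (n : Int) (matrix : List (List Int)), Dom_matrix_type n matrix → Pre_matrix_type n matrix → Spec_matrix_type n matrix (matrix_type n matrix)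

-- ===== LEMMAS AND PROOFS =====

-- a "flag" fold: the flag ends true iff it started true and no element trips it
theorem foldl_flag_p {α : Type} (l : List α) (p : α → Prop) [DecidablePred p] (b : Bool) :
    l.foldl (fun acc x => if p x then false else acc) b = (b && decide (∀ x ∈ l, ¬ p x)) := by
  induction l generalizing b with
  | nil => simp
  | cons a l ih =>
    rw [List.foldl_cons, ih]
    by_cases hp : p a <;> simp [hp]

theorem foldl_flag_all_p {α β : Type} (l : List α) (m : List β) (p : α → β → Prop)
    [∀ x y, Decidable (p x y)] (b : Bool) :
    l.foldl (fun acc x => m.foldl (fun acc2 y => if p x y then false else acc2) acc) b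
      = (b && decide (∀ x ∈ l, ∀ y ∈ m, ¬ p x y)) := by
  induction l generalizing b with
  | nil => simp
  | cons a l ih =>
    rw [List.foldl_cons, ih, foldl_flag_p]
    cases b <;> simp

-- a fused fold of three independent flags splits into three flag folds
theorem foldl3 {α : Type} (l : List α) (F : Bool × Bool × Bool → α → Bool × Bool × Bool)
    (f g h : Bool → α → Bool)
    (hF : ∀ st x, F st x = (f st.1 x, g st.2.1 x, h st.2.2 x)) (b : Bool × Bool × Bool) :
    l.foldl F b = (l.foldl f b.1, l.foldl g b.2.1, l.foldl h b.2.2) := by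
  induction l generalizing b with
  | nil => rfl
  | cons a l ih => simp only [List.foldl_cons, hF, ih]

theorem if2_collapse (P Q : Prop) [Decidable P] [Decidable Q] (b : Bool) :
    (if Q then false else if P then false else b) = (if P ∨ Q then false else b) := by
  split_ifs <;> tauto

-- A's result, characterised: the three flags say "no witness against the property"
theorem A_char (n : Int) (matrix : List (List Int)) : matrix_type n matrix =
    (let r := PySem.List.pyRange 0 n 1
     if ∀ i ∈ r, ∀ j ∈ r, ¬(i ≠ j ∧ pvGet matrix i j ≠ 0) then "Diagonal"
     else if ∀ i ∈ r, ∀ j ∈ r, ¬(pvGet matrix i j ≠ pvGet matrix j i) then "Symmetric"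
     else if ∀ i ∈ r, ∀ j ∈ r, ¬(pvGet matrix i j ≠ -pvGet matrix j i ∨ (i = j ∧ pvGet matrix i j ≠ 0)) then "Skew-Symmetric"
     else "None") := by
  unfold matrix_type
  simp only [if2_collapse]
  rw [foldl3 (PySem.List.pyRange 0 n 1)
    (fun st i =>
      (PySem.List.pyRange 0 n 1).foldl
        (fun st j =>
          (if i ≠ j ∧ pvGet matrix i j ≠ 0 then false else st.1,
            if pvGet matrix i j ≠ pvGet matrix j i then false else st.2.1,
            if pvGet matrix i j ≠ -pvGet matrix j i ∨ i = j ∧ pvGet matrix i j ≠ 0 then false else st.2.2))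
        st)
    (fun b1 i => (PySem.List.pyRange 0 n 1).foldl
      (fun a j => if i ≠ j ∧ pvGet matrix i j ≠ 0 then false else a) b1)
    (fun b2 i => (PySem.List.pyRange 0 n 1).foldl
      (fun a j => if pvGet matrix i j ≠ pvGet matrix j i then false else a) b2)
    (fun b3 i => (PySem.List.pyRange 0 n 1).foldl
      (fun a j => if pvGet matrix i j ≠ -pvGet matrix j i ∨ (i = j ∧ pvGet matrix i j ≠ 0) then false else a) b3)
    (fun st i => foldl3 _ _
      (fun a j => if i ≠ j ∧ pvGet matrix i j ≠ 0 then false else a)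
      (fun a j => if pvGet matrix i j ≠ pvGet matrix j i then false else a)
      (fun a j => if pvGet matrix i j ≠ -pvGet matrix j i ∨ (i = j ∧ pvGet matrix i j ≠ 0) then false else a)
      (fun st j => rfl) st) (true, true, true)]
  simp only [foldl_flag_all_p, Bool.true_and, decide_eq_true_eq]

theorem matrix_type_spec : Claim_equal_matrix_type := by
  intro n matrix _ _
  unfold Spec_matrix_type
  rw [A_char]
  unfold matrix_type_alt
  simp only []
  have hd : (∀ i ∈ PySem.List.pyRange 0 n 1, ∀ j ∈ PySem.List.pyRange 0 n 1,
      ¬(i ≠ j ∧ pvGet matrix i j ≠ 0)) ↔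
      ((PySem.List.pyRange 0 n 1).all (fun i => (PySem.List.pyRange 0 n 1).all
        (fun j => i == j || pvGet matrix i j == 0)) = true) := by
    simp [List.all_eq_true]
    constructor <;> intro h i hi j hj <;> have := h i hi j hj <;> tauto
  have hs : (∀ i ∈ PySem.List.pyRange 0 n 1, ∀ j ∈ PySem.List.pyRange 0 n 1,
      ¬(pvGet matrix i j ≠ pvGet matrix j i)) ↔
      ((PySem.List.pyRange 0 n 1).map (fun i => (PySem.List.pyRange 0 n 1).map (fun j => pvGet matrix i j))
        = (PySem.List.pyRange 0 n 1).map (fun i => (PySem.List.pyRange 0 n 1).map (fun j => pvGet matrix j i))) := by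
    simp
  have hk : (∀ i ∈ PySem.List.pyRange 0 n 1, ∀ j ∈ PySem.List.pyRange 0 n 1,
      ¬(pvGet matrix i j ≠ -pvGet matrix j i ∨ (i = j ∧ pvGet matrix i j ≠ 0))) ↔
      ((PySem.List.pyRange 0 n 1).map (fun i => (PySem.List.pyRange 0 n 1).map (fun j => pvGet matrix i j))
        = ((PySem.List.pyRange 0 n 1).map (fun i => (PySem.List.pyRange 0 n 1).map (fun j => pvGet matrix j i))).map
            (fun row => row.map (fun x => -x))) := by
    simp only [List.map_map, List.map_eq_map_iff, not_or, not_and, not_not, ne_eq,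
      Function.comp_def]
    constructor
    · intro h i hi j hj
      exact (h i hi j hj).1
    · intro h i hi j hj
      have h1 := h i hi j hj
      refine ⟨h1, fun hij => ?_⟩
      subst hij
      omega
  simp only [hd, hs, hk]
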